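-- pv_equiv track=rewrite | github.com/fmfi-compbio/mc-overlaps | src/simple_model.py | get_intervals_from_emissions
-- ===== SOURCE A (Python) =====
-- import itertools
--
-- def get_intervals_from_emissions(emissions):
--     last_b = -1
--     is_open = False
--     result = []
--     for p, s in enumerate(itertools.chain(emissions, [0])):
--         if s == 1 and not is_open:
--             is_open = True
--             last_b = p
--         elif s == 0 and is_open:
--             result.append((last_b, p))
--             is_open = False
--     return result
-- ===== SOURCE B (Python) =====
-- def get_intervals_from_emissions(emissions):
--     xs = list(emissions)
--     xs.append(0)
--     n = len(xs)
--     result = []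
--     i = 0
--     while i < n:
--         if xs[i] == 1:
--             start = i
--             j = i + 1
--             while j < n and xs[j] != 0:
--                 j += 1
--             if j < n:
--                 result.append((start, j))
--             i = j + 1
--         else:
--             i += 1
--     return result
-- ===== Notes on version B (the rewrite author's own statement) =====
-- stated objective: alternative
-- what changed: Replaces the single position-by-position state-machine pass (is_open/last_b flags over every element) with a two-level scan over the 0-appended list: an outer loop that jumps between runs and, on seeing a 1, an inner scan that skips ahead to the closing 0, emitting the interval directly with no open/closed state variables.
import Mathlib
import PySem

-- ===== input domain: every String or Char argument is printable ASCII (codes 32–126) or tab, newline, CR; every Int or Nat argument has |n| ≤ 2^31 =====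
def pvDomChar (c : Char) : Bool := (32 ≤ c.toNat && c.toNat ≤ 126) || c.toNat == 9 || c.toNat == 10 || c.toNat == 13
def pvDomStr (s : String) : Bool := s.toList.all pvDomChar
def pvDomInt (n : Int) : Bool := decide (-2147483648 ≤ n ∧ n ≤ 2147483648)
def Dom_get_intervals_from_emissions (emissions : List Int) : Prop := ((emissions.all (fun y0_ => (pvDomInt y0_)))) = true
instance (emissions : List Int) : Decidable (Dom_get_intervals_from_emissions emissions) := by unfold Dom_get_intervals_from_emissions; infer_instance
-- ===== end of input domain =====

-- ===== PORT A =====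
-- B changes the decomposition: a two-level scan over runs instead of A's per-position is_open/last_b state machine; same return value.
-- Port of A: the for-loop over enumerate(chain(emissions,[0])) becomes structural recursion over
-- emissions ++ [0] carrying the same state (position p, last_b, is_open, result).
def aLoop : List Int → Int → Int → Bool → List (Int × Int) → List (Int × Int)
  | [], _, _, _, res => res
  | s :: rest, p, lb, isOpen, res =>
    if s = 1 ∧ isOpen = false then aLoop rest (p + 1) p true res
    else if s = 0 ∧ isOpen = true then aLoop rest (p + 1) lb false (res ++ [(lb, p)])
    else aLoop rest (p + 1) lb isOpen res

def get_intervals_from_emissions (emissions : List Int) : List (Int × Int) :=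
  aLoop (emissions ++ [0]) 0 (-1) false []

-- ===== PORT B =====
-- Port of B: the outer while loop (scanning for a 1) and the inner while loop
-- (scanning for the closing 0) become two structural recursions over the rest of the list.
mutual
def bScan : List Int → Int → List (Int × Int)
  | [], _ => []
  | x :: rest, i =>
    if x = 1 then bClose rest (i + 1) i
    else bScan rest (i + 1)
def bClose : List Int → Int → Int → List (Int × Int)
  | [], _, _ => []                     -- inner scan ran off the end: nothing appended (j = n)
  | x :: rest, j, start =>
    if x = 0 then (start, j) :: bScan rest (j + 1)
    else bClose rest (j + 1) start
end

def get_intervals_from_emissions_alt (emissions : List Int) : List (Int × Int) :=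
  bScan (emissions ++ [0]) 0

-- ===== PRECONDITION & SPEC =====
def Spec_get_intervals_from_emissions (emissions : List Int) (out : List (Int × Int)) : Prop := out = get_intervals_from_emissions_alt emissions
instance (emissions : List Int) (out : List (Int × Int)) : Decidable (Spec_get_intervals_from_emissions emissions out) := by unfold Spec_get_intervals_from_emissions; infer_instance

-- ===== CLAIM (what is proved, stated in full; the proofs are below) =====
def Claim_equal_get_intervals_from_emissions : Prop := ∀ (emissions : List Int), Dom_get_intervals_from_emissions emissions → Spec_get_intervals_from_emissions emissions (get_intervals_from_emissions emissions)

-- ===== LEMMAS AND PROOFS =====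
-- A's state machine, run from the closed state, produces res ++ bScan; from the open
-- state (with last_b = lb), res ++ bClose.  One induction over the list covers both.
theorem aLoop_eq (xs : List Int) : ∀ (i lb : Int) (b : Bool) (res : List (Int × Int)),
    aLoop xs i lb b res = res ++ (if b then bClose xs i lb else bScan xs i) := by
  induction xs with
  | nil => intro i lb b res; cases b <;> simp [aLoop, bScan, bClose]
  | cons x rest ih =>
    intro i lb b res
    cases b with
    | false =>
      by_cases h1 : x = 1
      · simp [aLoop, bScan, h1, ih]
      · simp [aLoop, bScan, h1, ih]
    | true =>
      by_cases h0 : x = 0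
      · simp [aLoop, bClose, h0, ih]
      · by_cases h1 : x = 1 <;> simp [aLoop, bClose, h0, h1, ih]

-- ===== VERDICT (by name: the statement is the Claim_ definition above) =====
theorem get_intervals_from_emissions_spec : Claim_equal_get_intervals_from_emissions := by
  intro emissions _
  unfold Spec_get_intervals_from_emissions get_intervals_from_emissions get_intervals_from_emissions_alt
  simp [aLoop_eq]
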